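-- pv_equiv track=rewrite | github.com/or-m-or/KT-AIVLE-School-5th_Codingmasters | example/round2/Intermediate/Q8712_블로그/A8712.py | solution
-- ===== SOURCE A (Python) =====
-- def solution(n, k, visitors):
--     # 초기 K일 동안의 방문자 수 합계
--     current_sum = sum(visitors[:k])
--     max_sum = current_sum
--     start_index = 0
--
--     # 슬라이딩 윈도우로 나머지 기간의 합계 계산
--     for i in range(1, n - k + 1):
--         current_sum = current_sum - visitors[i - 1] + visitors[i + k - 1]
--         if current_sum > max_sum:
--             max_sum = current_sum
--             start_index = i
--
--     # 1부터 시작하는 인덱스 반환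
--     return start_index + 1
-- ===== SOURCE B (Python) =====
-- def solution(n, k, visitors):
--     m = n - k + 1          # number of candidate start days
--     if m <= 1:
--         return 1           # at most one window: it starts on day 1
--     pre = [0]
--     s = 0
--     for v in visitors:
--         s += v
--         pre.append(s)
--     sums = [pre[i + k] - pre[i] for i in range(m)]
--     return sums.index(max(sums)) + 1
-- ===== Notes on version B (the rewrite author's own statement) =====
-- stated objective: alternative
-- what changed: Replaces A's single-pass rolling subtract/add argmax loop by three staged passes: build a prefix-sum table, materialise the explicit list of all window sums from table differences, then select the answer as the first index of the maximum via index(max(sums)); Pre_ excludes inputs where n exceeds the list length or k is negative, on which A either raises IndexError or returns a value produced by accidental negative-index wraparound.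
-- outside the precondition, e.g. on solution(2, -1, [1, 2, 3]): A returns 2, B returns 1
import Mathlib
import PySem

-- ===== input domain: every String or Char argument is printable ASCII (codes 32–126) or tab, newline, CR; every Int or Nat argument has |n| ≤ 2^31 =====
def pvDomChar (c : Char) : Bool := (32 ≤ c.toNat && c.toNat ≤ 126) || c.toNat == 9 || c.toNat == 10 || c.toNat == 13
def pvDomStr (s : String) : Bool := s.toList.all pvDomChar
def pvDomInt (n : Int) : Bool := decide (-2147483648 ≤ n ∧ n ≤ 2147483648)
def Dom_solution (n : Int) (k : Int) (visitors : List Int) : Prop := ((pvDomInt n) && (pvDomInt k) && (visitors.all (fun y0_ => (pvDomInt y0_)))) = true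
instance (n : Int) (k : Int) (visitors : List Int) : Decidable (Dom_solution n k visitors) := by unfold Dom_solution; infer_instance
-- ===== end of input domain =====

-- B replaces A's single-pass rolling-sum argmax loop by three staged passes: build a
-- prefix-sum table, materialise the list of all window sums, then select with
-- max / first-index-of (objective: alternative; same O(n) cost, different decomposition).

-- ===== PORT A =====
-- sliding window: state = (current_sum, max_sum, start_index)
def solution (n : Int) (k : Int) (visitors : List Int) : Int :=
  let currentSum : Int := (PySem.List.slice visitors none (some k)).sum
  let st :=
    (PySem.List.pyRange 1 (n - k + 1) 1).foldl
      (fun (st : Int × Int × Int) (i : Int) =>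
        let c := st.1 - (PySem.List.pyGet? visitors (i - 1)).getD 0
                      + (PySem.List.pyGet? visitors (i + k - 1)).getD 0
        if c > st.2.1 then (c, c, i) else (c, st.2.1, st.2.2))
      (currentSum, currentSum, 0)
  st.2.2 + 1

-- ===== PORT B =====
-- staged passes: prefix-sum table, explicit list of window sums, then index(max(sums))
def solution_alt (n : Int) (k : Int) (visitors : List Int) : Int :=
  let m := n - k + 1
  if m ≤ 1 then 1
  else
    let pre : List Int :=
      (visitors.foldl (fun (st : List Int × Int) v => (st.1 ++ [st.2 + v], st.2 + v)) ([0], 0)).1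
    let sums : List Int :=
      (PySem.List.pyRange 0 m 1).map
        (fun i => PySem.List.pyGetD pre (i + k) 0 - PySem.List.pyGetD pre i 0)
    ((PySem.List.index? sums ((PySem.List.max? sums (fun y => y)).getD 0)).getD 0 : Nat) + 1

-- ===== PRECONDITION & SPEC =====
-- Pre_ excludes inputs where n exceeds the list length or k is negative: there A either
-- raises IndexError or returns a value produced by accidental negative-index wraparound,
-- while B's prefix-table lookups raise or disagree.
def Pre_solution (n : Int) (k : Int) (visitors : List Int) : Prop :=
  n ≤ k ∨ (0 ≤ k ∧ n ≤ visitors.length)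
instance (n : Int) (k : Int) (visitors : List Int) : Decidable (Pre_solution n k visitors) := by unfold Pre_solution; infer_instance
def pvWitness_solution : Int × Int × List Int := (5, 2, [3, -1, 4, 1, 5])

def Spec_solution (n : Int) (k : Int) (visitors : List Int) (out : Int) : Prop := out = solution_alt n k visitors
instance (n : Int) (k : Int) (visitors : List Int) (out : Int) : Decidable (Spec_solution n k visitors out) := by unfold Spec_solution; infer_instance

-- ===== CLAIM (what is proved, stated in full; the proofs are below) =====
def Claim_equal_solution : Prop := ∀ (n : Int) (k : Int) (visitors : List Int), Dom_solution n k visitors → Pre_solution n k visitors → Spec_solution n k visitors (solution n k visitors)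

-- ===== LEMMAS AND PROOFS =====

-- the window-sum function both sides compute: sum of visitors[i : i+k]
def wfun (visitors : List Int) (k : Nat) (i : Int) : Int :=
  (visitors.take (i + (k : Int)).toNat).sum - (visitors.take i.toNat).sum

-- B's append-building fold produces the prefix-sum table
theorem pre_fold (xs : List Int) : ∀ (a : List Int) (c : Int),
    (xs.foldl (fun (st : List Int × Int) v => (st.1 ++ [st.2 + v], st.2 + v)) (a, c)).1
      = a ++ (List.range xs.length).map (fun j => c + (xs.take (j + 1)).sum) := by
  induction xs with
  | nil => intro a c; simp
  | cons x xs ih =>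
    intro a c
    simp only [List.foldl_cons]
    rw [ih (a ++ [c + x]) (c + x)]
    simp [List.range_succ_eq_map, Function.comp, List.map_map, add_assoc]

theorem pre_eq (visitors : List Int) :
    (visitors.foldl (fun (st : List Int × Int) v => (st.1 ++ [st.2 + v], st.2 + v)) ([0], 0)).1
      = (List.range (visitors.length + 1)).map (fun j => (visitors.take j).sum) := by
  rw [pre_fold visitors [0] 0]
  simp [List.range_succ_eq_map, List.map_map, Function.comp]

theorem pre_get (visitors : List Int) (j : Nat) (hj : j ≤ visitors.length) :
    PySem.List.pyGetD
      ((List.range (visitors.length + 1)).map (fun j => (visitors.take j).sum)) (j : Int) 0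
      = (visitors.take j).sum := by
  rw [PySem.List.pyGetD_natCast]
  rw [List.getD_eq_getElem?_getD, List.getElem?_map, List.getElem?_range (by omega)]
  rfl

-- A's rolling sum after t steps equals the window sum; A's fold reduces to an argmax fold over wfun
theorem fold_agree (visitors : List Int) (k : Nat) (hk : k ≤ visitors.length) :
    ∀ (t : Nat), t ≤ visitors.length - k → ∀ (p : Int × Int),
    (PySem.List.pyRange 1 (1 + (t : Int)) 1).foldl
      (fun (st : Int × Int × Int) (i : Int) =>
        let c := st.1 - (PySem.List.pyGet? visitors (i - 1)).getD 0
                      + (PySem.List.pyGet? visitors (i + (k : Int) - 1)).getD 0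
        if c > st.2.1 then (c, c, i) else (c, st.2.1, st.2.2))
      ((visitors.take k).sum, p.1, p.2)
    = ((visitors.take (t + k)).sum - (visitors.take t).sum,
       (PySem.List.pyRange 1 (1 + (t : Int)) 1).foldl
        (fun (st : Int × Int) (i : Int) =>
          if wfun visitors k i > st.1 then (wfun visitors k i, i) else st)
        p) := by
  intro t
  induction t with
  | zero =>
    intro _ p
    norm_num [PySem.List.pyRange]
  | succ t ih =>
    intro ht p
    have hrange : PySem.List.pyRange 1 (1 + ((t + 1 : Nat) : Int)) 1
        = PySem.List.pyRange 1 (1 + (t : Int)) 1 ++ [1 + (t : Int)] := by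
      rw [show (1 : Int) + ((t + 1 : Nat) : Int) = (1 + (t : Int)) + 1 by push_cast; ring]
      exact PySem.List.pyRange_one_succ_right (by omega)
    have htlen : t < visitors.length := by omega
    have htk : t + k < visitors.length := by omega
    have hvt : (PySem.List.pyGet? visitors ((1 + (t : Int)) - 1)).getD 0 = visitors[t] := by
      rw [show (1 + (t : Int)) - 1 = ((t : Nat) : Int) by omega,
        PySem.List.pyGet?_natCast, List.getElem?_eq_getElem htlen]
      rfl
    have hvtk : (PySem.List.pyGet? visitors ((1 + (t : Int)) + (k : Int) - 1)).getD 0 = visitors[t + k] := by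
      rw [show (1 + (t : Int)) + (k : Int) - 1 = ((t + k : Nat) : Int) by push_cast; ring,
        PySem.List.pyGet?_natCast, List.getElem?_eq_getElem htk]
      rfl
    have hw : wfun visitors k (1 + (t : Int))
        = (visitors.take (t + 1 + k)).sum - (visitors.take (t + 1)).sum := by
      unfold wfun
      rw [show ((1 + (t : Int)) + (k : Int)).toNat = t + 1 + k by omega,
        show (1 + (t : Int)).toNat = t + 1 by omega]
    have hW : (visitors.take (t + k)).sum - (visitors.take t).sum - visitors[t] + visitors[t + k]
        = (visitors.take (t + 1 + k)).sum - (visitors.take (t + 1)).sum := by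
      rw [show t + 1 + k = (t + k) + 1 by ring, List.sum_take_succ _ _ htk,
        List.sum_take_succ _ _ htlen]
      ring
    rw [hrange, List.foldl_append, List.foldl_append, ih (by omega) p]
    simp only [List.foldl_cons, List.foldl_nil, hvt, hvtk, hw, hW]
    split <;> simp

-- the strict-> argmax fold computes the maximum of the window-sum list and its first index
theorem sel (w : Int → Int) : ∀ (t : Nat),
    ∃ (M : Int) (jn : Nat),
      (PySem.List.pyRange 1 (1 + (t : Int)) 1).foldl
        (fun (st : Int × Int) (i : Int) => if w i > st.1 then (w i, i) else st)
        (w 0, 0) = (M, (jn : Int))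
      ∧ (∀ y ∈ (List.range (t + 1)).map (fun j : Nat => w (j : Int)), y ≤ M)
      ∧ PySem.List.index? ((List.range (t + 1)).map (fun j : Nat => w (j : Int))) M = some jn := by
  intro t
  induction t with
  | zero =>
    refine ⟨w 0, 0, ?_, ?_, ?_⟩
    · rw [PySem.List.pyRange_one_eq_nil (by omega)]; rfl
    · intro y hy; simp at hy; omega
    · simp
  | succ t ih =>
    obtain ⟨M, jn, hfold, hmax, hidx⟩ := ih
    have hrange : PySem.List.pyRange 1 (1 + ((t + 1 : Nat) : Int)) 1
        = PySem.List.pyRange 1 (1 + (t : Int)) 1 ++ [1 + (t : Int)] := by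
      rw [show (1 : Int) + ((t + 1 : Nat) : Int) = (1 + (t : Int)) + 1 by push_cast; ring]
      exact PySem.List.pyRange_one_succ_right (by omega)
    have hws : (List.range (t + 1 + 1)).map (fun j : Nat => w (j : Int))
        = (List.range (t + 1)).map (fun j : Nat => w (j : Int)) ++ [w ((t + 1 : Nat) : Int)] := by
      rw [List.range_succ, List.map_append]; rfl
    have hcast : ((t + 1 : Nat) : Int) = 1 + (t : Int) := by push_cast; ring
    rw [hrange, List.foldl_append, hfold, hws]
    simp only [List.foldl_cons, List.foldl_nil]
    by_cases hgt : w (1 + (t : Int)) > M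
    · refine ⟨w (1 + (t : Int)), t + 1, ?_, ?_, ?_⟩
      · simp [hgt, hcast]
      · intro y hy
        rcases List.mem_append.mp hy with h | h
        · exact le_of_lt (lt_of_le_of_lt (hmax y h) hgt)
        · simp at h
          rw [h, show ((t : Int) + 1) = 1 + (t : Int) by ring]
      · have hnot : w ((t + 1 : Nat) : Int) ∉ (List.range (t + 1)).map (fun j : Nat => w (j : Int)) := by
          intro hmem
          have := hmax _ hmem
          rw [hcast] at this; omega
        rw [hcast] at hnot
        rw [show w ((t + 1 : Nat) : Int) = w (1 + (t : Int)) by rw [hcast],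
          PySem.List.index?_append_singleton_self _ _ hnot]
        simp
    · refine ⟨M, jn, ?_, ?_, ?_⟩
      · simp [hgt]
      · intro y hy
        rcases List.mem_append.mp hy with h | h
        · exact hmax y h
        · simp at h
          rw [h, show ((t : Int) + 1) = 1 + (t : Int) by ring]
          omega
      · have hmem : M ∈ (List.range (t + 1)).map (fun j : Nat => w (j : Int)) :=
          (PySem.List.index?_isSome_iff _ _).mp (by rw [hidx]; rfl)
        rw [PySem.List.index?_append_of_mem _ hmem, hidx]

theorem main_eq (n : Int) (k : Int) (visitors : List Int)
    (h : Pre_solution n k visitors) :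
    solution n k visitors = solution_alt n k visitors := by
  by_cases hle : n ≤ k
  · unfold solution solution_alt
    rw [PySem.List.pyRange_one_eq_nil (by omega)]
    simp [show n - k + 1 ≤ 1 by omega]
  · rcases h with h | ⟨hk0, hnl⟩
    · exact absurd h hle
    set k' : Nat := k.toNat with hk'
    have hkc : k = (k' : Int) := by omega
    have hkl : k' ≤ visitors.length := by omega
    set t : Nat := (n - k).toNat with htdef
    have ht1 : 1 ≤ t := by omega
    have hnk : n - (k' : Int) + 1 = 1 + (t : Int) := by omega
    have htl : t ≤ visitors.length - k' := by omega
    have hs : PySem.List.slice visitors none (some ((k' : Nat) : Int)) = visitors.take k' := by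
      rw [PySem.List.slice_to visitors (by omega)]
      norm_num
    -- the window-sum function; B's table lookups compute it
    have hpre := pre_eq visitors
    have hget : ∀ (j : Nat), j + k' ≤ visitors.length →
        PySem.List.pyGetD
          ((List.range (visitors.length + 1)).map (fun j => (visitors.take j).sum)) ((j : Int) + (k' : Int)) 0
        - PySem.List.pyGetD
          ((List.range (visitors.length + 1)).map (fun j => (visitors.take j).sum)) (j : Int) 0
        = wfun visitors k' (j : Int) := by
      intro j hjk
      rw [show (j : Int) + (k' : Int) = ((j + k' : Nat) : Int) by push_cast; ring]
      rw [pre_get visitors (j + k') hjk, pre_get visitors j (by omega)]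
      unfold wfun
      rw [show (((j : Nat) : Int) + (k' : Int)).toNat = j + k' by omega]
      simp
    obtain ⟨M, jn, hfold, hmax, hidx⟩ := sel (wfun visitors k') t
    -- A's value
    have hw0 : wfun visitors k' 0 = (visitors.take k').sum := by
      unfold wfun
      rw [show ((0 : Int) + (k' : Int)).toNat = k' by omega]
      simp
    rw [hw0] at hfold
    have hA : solution n k visitors = (jn : Int) + 1 := by
      unfold solution
      simp only [hkc, hnk, hs]
      have h1 := fold_agree visitors k' hkl t htl (((visitors.take k')).sum, 0)
      rw [hfold] at h1
      exact congrArg (fun r => r.2.2 + 1) h1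
    -- B's value
    have hB : solution_alt n k visitors = (jn : Int) + 1 := by
      unfold solution_alt
      simp only []
      rw [if_neg (by omega), pre_eq]
      have hsums : (PySem.List.pyRange 0 (n - k + 1) 1).map
            (fun i => PySem.List.pyGetD
                ((List.range (visitors.length + 1)).map (fun j => (visitors.take j).sum)) (i + k) 0
              - PySem.List.pyGetD
                ((List.range (visitors.length + 1)).map (fun j => (visitors.take j).sum)) i 0)
          = (List.range (t + 1)).map (fun j : Nat => wfun visitors k' (j : Int)) := by
        rw [PySem.List.pyRange_one, show (n - k + 1 - 0).toNat = t + 1 by omega, List.map_map]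
        refine List.map_congr_left ?_
        intro j hj
        have hj' : j < t + 1 := List.mem_range.mp hj
        simp only [Function.comp]
        rw [hkc, show (0 : Int) + (j : Nat) = ((j : Nat) : Int) by omega]
        exact hget j (by omega)
      rw [hsums]
      -- max? returns M by antisymmetry with the fold's maximum
      have hne : (List.range (t + 1)).map (fun j : Nat => wfun visitors k' (j : Int)) ≠ [] := by
        simp [List.range_succ]
      obtain ⟨m, hm⟩ : ∃ m, PySem.List.max?
          ((List.range (t + 1)).map (fun j : Nat => wfun visitors k' (j : Int))) (fun y => y) = some m := by
        cases hmx : PySem.List.max?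
            ((List.range (t + 1)).map (fun j : Nat => wfun visitors k' (j : Int))) (fun y => y) with
        | none => exact absurd ((PySem.List.max?_eq_none_iff _ _).mp hmx) hne
        | some m => exact ⟨m, rfl⟩
      have hmemM : M ∈ (List.range (t + 1)).map (fun j : Nat => wfun visitors k' (j : Int)) :=
        (PySem.List.index?_isSome_iff _ _).mp (by rw [hidx]; rfl)
      have hmM : m = M := by
        have h1 : m ≤ M := hmax m (PySem.List.max?_mem hm)
        have h2 : M ≤ m := PySem.List.max?_isMax hm M hmemM
        omega
      rw [hm, hmM]
      simp only [Option.getD_some]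
      rw [hidx]
      rfl
    rw [hA, hB]

-- ===== VERDICT (by name: the statement is the Claim_ definition above) =====
theorem solution_spec : Claim_equal_solution := by
  intro n k visitors _ hpre
  unfold Spec_solution
  exact main_eq n k visitors hpre
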